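-- pv_equiv track=rewrite | github.com/DanielBatteryStapler/preconfig | src/daniel_preconfig/preconfig.py | fixIndents
-- ===== SOURCE A (Python) =====
-- def fixIndents(text):
-- 	if text[0] == "\n":
-- 		text = text[1:]
--
-- 	indentPrefix = "\n"
-- 	for c in text:
-- 		if c == " " or c == "\t":
-- 			indentPrefix += c
-- 		else:
-- 			break
--
-- 	text = "\n" + text;
-- 	text = text.replace(indentPrefix, "\n").strip()
--
-- 	return text
-- ===== SOURCE B (Python) =====
-- def fixIndents(text):
--     if text[0] == "\n":
--         text = text[1:]
--
--     n = 0
--     while n < len(text) and text[n] in " \t":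
--         n += 1
--     indent = text[:n]
--
--     parts = []
--     pos = 0
--     m = len(text)
--     while pos < m:
--         if text.startswith(indent, pos):
--             pos += n
--         j = text.find("\n", pos)
--         if j == -1:
--             j = m - 1
--         parts.append(text[pos:j + 1])
--         pos = j + 1
--     return "".join(parts).strip()
-- ===== Notes on version B (the rewrite author's own statement) =====
-- stated objective: alternative
-- what changed: Replaced the single whole-string replace of newline-plus-indent with one index-driven scan: at each line start strip the common indent if present, copy through the next newline, collect the pieces and strip the joined result.
import Mathlib
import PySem

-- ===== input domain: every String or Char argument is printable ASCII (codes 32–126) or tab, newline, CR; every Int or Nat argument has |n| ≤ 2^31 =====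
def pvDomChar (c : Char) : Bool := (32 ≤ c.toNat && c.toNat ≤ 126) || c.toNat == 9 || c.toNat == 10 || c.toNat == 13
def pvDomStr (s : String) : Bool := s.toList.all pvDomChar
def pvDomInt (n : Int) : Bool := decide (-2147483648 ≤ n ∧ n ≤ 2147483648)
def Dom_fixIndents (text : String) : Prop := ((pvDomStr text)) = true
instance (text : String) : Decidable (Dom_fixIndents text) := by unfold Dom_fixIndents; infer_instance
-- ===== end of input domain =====

-- B replaces A's whole-string replace("\n"+indent, "\n") by a single index-driven scan: at each
-- line start strip the indent if present, then copy up to and including the next newline; the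
-- collected pieces are joined and stripped. Same cost, a genuinely different traversal.

-- ===== PORT A =====
-- A's 'indentPrefix = "\n"; for c in text: if c in " \t": indentPrefix += c else: break' loop;
-- exact: appends while space/tab, stops at the first other char
def fixIndentsWsLoop (acc : List Char) : List Char → List Char
  | [] => acc
  | c :: rest => if c = ' ' ∨ c = '\t' then fixIndentsWsLoop (acc ++ [c]) rest else acc

def fixIndents (text : String) : String :=
  let t0 := text.toList
  -- if text[0] == "\n": text = text[1:]   (text[0] of "" raises IndexError: excluded by Pre_)
  let t1 := if PySem.List.pyGet? t0 0 = some '\n' then PySem.Chars.slice t0 (some 1) none else t0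
  -- indentPrefix = "\n"; for c in text: …
  let indentPrefix := fixIndentsWsLoop ['\n'] t1
  -- text = "\n" + text
  let t2 := '\n' :: t1
  -- text = text.replace(indentPrefix, "\n").strip()
  String.ofList (PySem.Chars.strip (PySem.Chars.replace t2 indentPrefix ['\n']))

-- ===== PORT B =====
-- B's 'while pos < m' loop, with pos represented by the remaining suffix of the text:
-- strip the indent at the line start (text.startswith(indent, pos)), then text.find("\n", pos)
-- = length of the (· != '\n')-takeWhile prefix; emit text[pos:j+1] and continue at text[j+1:].
def dedentGo (ind : List Char) : List Char → List (List Char)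
  | [] => []
  | c :: t =>
    let rem := if PySem.Chars.startswith (c :: t) ind then (c :: t).drop ind.length else c :: t
    let rest := rem.dropWhile (fun x => x != '\n')
    if rest.isEmpty then [rem]   -- find returned -1: the last piece is text[pos:]
    else (rem.takeWhile (fun x => x != '\n') ++ ['\n']) :: dedentGo ind rest.tail
termination_by l => l.length
decreasing_by
  have h1 : (rem.dropWhile (fun x => x != '\n')).length ≤ rem.length :=
    List.length_dropWhile_le _ _
  have h2 : rem.length ≤ t.length + 1 := by
    simp only [rem]; split <;> simp
  cases hr : rem.dropWhile (fun x => x != '\n') with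
  | nil => simp [rest, hr] at *
  | cons d rest' => simp only [hr] at h1 ⊢; simp at h1 ⊢; omega

def fixIndents_alt (text : String) : String :=
  let t0 := text.toList
  -- if text[0] == "\n": text = text[1:]
  let t1 := if PySem.List.pyGet? t0 0 = some '\n' then PySem.Chars.slice t0 (some 1) none else t0
  -- n = 0; while n < len(text) and text[n] in " \t": n += 1; indent = text[:n]
  let indent := t1.takeWhile (fun c => c == ' ' || c == '\t')
  -- parts/pos loop, then "".join(parts).strip()
  String.ofList (PySem.Chars.strip (List.flatten (dedentGo indent t1)))

-- ===== PRECONDITION & SPEC =====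
-- Pre_ excludes only the empty string, on which A's text[0] raises IndexError (B raises there too).
def Pre_fixIndents (text : String) : Prop := text.toList ≠ []
instance (text : String) : Decidable (Pre_fixIndents text) := by unfold Pre_fixIndents; infer_instance
def pvWitness_fixIndents : String := "\n  line1\n    line2\n  line3"
def Spec_fixIndents (text : String) (out : String) : Prop := out = fixIndents_alt text
instance (text : String) (out : String) : Decidable (Spec_fixIndents text out) := by unfold Spec_fixIndents; infer_instance

-- ===== CLAIM (what is proved, stated in full; the proofs are below) =====
def Claim_equal_fixIndents : Prop := ∀ (text : String), Dom_fixIndents text → Pre_fixIndents text → Spec_fixIndents text (fixIndents text)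

-- ===== LEMMAS AND PROOFS =====

-- the A-side whitespace loop: peeling the accumulator off
lemma wsLoop_acc (t : List Char) : ∀ acc, fixIndentsWsLoop acc t = acc ++ fixIndentsWsLoop [] t := by
  induction t with
  | nil => intro acc; simp [fixIndentsWsLoop]
  | cons c t ih =>
    intro acc
    by_cases h : c = ' ' ∨ c = '\t'
    · simp only [fixIndentsWsLoop, if_pos h, List.nil_append]
      rw [ih (acc ++ [c]), ih [c]]
      simp
    · simp [fixIndentsWsLoop, if_neg h]

-- A's loop computes the same indent B's index loop (ported as takeWhile) computes
lemma wsLoop_eq_takeWhile (t : List Char) :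
    fixIndentsWsLoop [] t = t.takeWhile (fun c => c == ' ' || c == '\t') := by
  induction t with
  | nil => simp [fixIndentsWsLoop]
  | cons c t ih =>
    by_cases h : c = ' ' ∨ c = '\t'
    · simp only [fixIndentsWsLoop, if_pos h, List.nil_append]
      rw [wsLoop_acc, ih]
      have hb : (c == ' ' || c == '\t') = true := by
        rcases h with h | h <;> simp [h]
      simp [hb]
    · have hb : (c == ' ' || c == '\t') = false := by
        simp only [Bool.or_eq_false_iff, beq_eq_false_iff_ne]
        exact ⟨fun h' => h (Or.inl h'), fun h' => h (Or.inr h')⟩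
      simp [fixIndentsWsLoop, if_neg h, hb]

-- clean recursion computing replace s ('\n'::ind) ['\n']
def repN (ind : List Char) : List Char → List Char
  | [] => []
  | c :: t =>
    if ('\n' :: ind).isPrefixOf (c :: t) then '\n' :: repN ind (t.drop ind.length)
    else c :: repN ind t
termination_by s => s.length
decreasing_by
  · simp only [List.length_drop, List.length_cons]; omega
  · simp only [List.length_cons]; omega

lemma replace_go_eq (ind : List Char) : ∀ (fuel : Nat) (l acc : List Char), l.length ≤ fuel →
    PySem.Chars.replace.go ('\n' :: ind) ['\n'] fuel l acc = acc.reverse ++ repN ind l := by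
  intro fuel
  induction fuel with
  | zero =>
    intro l acc h
    have hl : l = [] := by cases l <;> simp_all
    subst hl
    simp [PySem.Chars.replace.go, repN]
  | succ fuel ih =>
    intro l acc h
    cases l with
    | nil => simp [PySem.Chars.replace.go, repN]
    | cons c t =>
      rw [PySem.Chars.replace.go]
      by_cases hp : ('\n' :: ind).isPrefixOf (c :: t) = true
      · rw [if_pos hp]
        have hlen : (t.drop ind.length).length ≤ fuel := by
          simp only [List.length_drop]
          simp at h; omega
        rw [show (List.drop ('\n' :: ind).length (c :: t)) = t.drop ind.length by
              simp [List.drop_succ_cons]]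
        rw [ih _ _ hlen]
        rw [repN, if_pos hp]
        simp
      · rw [if_neg hp]
        have hlen : t.length ≤ fuel := by simp at h; omega
        rw [ih _ _ hlen]
        rw [repN, if_neg hp]
        simp

lemma replace_eq_repN (ind s : List Char) :
    PySem.Chars.replace s ('\n' :: ind) ['\n'] = repN ind s := by
  rw [PySem.Chars.replace]
  simp only [List.isEmpty_cons, if_false, Bool.false_eq_true]
  rw [replace_go_eq ind s.length s [] (le_refl _)]
  simp

-- repN copies a newline-free segment unchanged
lemma repN_copy (ind : List Char) : ∀ (l r : List Char), '\n' ∉ l → repN ind (l ++ r) = l ++ repN ind r := by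
  intro l
  induction l with
  | nil => intro r _; simp
  | cons c l ih =>
    intro r hc
    have hcn : c ≠ '\n' := fun h => hc (by simp [h])
    rw [List.cons_append, repN]
    have hpf : (('\n' :: ind).isPrefixOf (c :: (l ++ r))) = false := by
      simp only [List.isPrefixOf]
      have : (('\n' : Char) == c) = false := by
        simp only [beq_eq_false_iff_ne, ne_eq]
        exact fun h => hcn h.symm
      simp [this]
    rw [if_neg (by simp [hpf])]
    rw [ih r (fun h => hc (by simp [h]))]
    simp

lemma repN_no_newline (ind l : List Char) (h : '\n' ∉ l) : repN ind l = l := by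
  have := repN_copy ind l [] h
  simpa [repN] using this

-- MAIN LEMMA: A's replace of '\n'+ind on '\n'+text equals B's line-at-a-time scan
lemma repN_eq_dedentGo (ind : List Char) :
    ∀ (n : Nat) (t : List Char), t.length ≤ n →
      repN ind ('\n' :: t) = '\n' :: (dedentGo ind t).flatten := by
  intro n
  induction n with
  | zero =>
    intro t ht
    have : t = [] := by cases t <;> simp_all
    subst this
    rw [repN, dedentGo]
    split <;> simp [repN]
  | succ n ih =>
    intro t ht
    cases t with
    | nil =>
      rw [repN, dedentGo]
      split <;> simp [repN]
    | cons c t' =>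
      -- first step of repN: the pattern '\n'::ind matches at the leading '\n' iff ind prefixes c::t'
      have hstep : repN ind ('\n' :: c :: t') =
          '\n' :: repN ind (if PySem.Chars.startswith (c :: t') ind
                            then (c :: t').drop ind.length else c :: t') := by
        rw [repN]
        by_cases hp : ind.isPrefixOf (c :: t') = true
        · rw [if_pos (by simp [List.isPrefixOf, hp]),
              if_pos (show PySem.Chars.startswith (c :: t') ind = true from hp)]
        · rw [if_neg (by simp [List.isPrefixOf, hp]),
              if_neg (show ¬ PySem.Chars.startswith (c :: t') ind = true from hp)]
      rw [hstep]
      set rem := if PySem.Chars.startswith (c :: t') ind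
                 then (c :: t').drop ind.length else c :: t' with hrem
      have hremlen : rem.length ≤ t'.length + 1 := by
        rw [hrem]; split <;> simp
      have hline : '\n' ∉ rem.takeWhile (fun x => x != '\n') := by
        intro h
        have := List.mem_takeWhile_imp h
        simp at this
      have hsplit : rem = rem.takeWhile (fun x => x != '\n') ++ rem.dropWhile (fun x => x != '\n') :=
        (List.takeWhile_append_dropWhile).symm
      rw [dedentGo]
      cases hrest : rem.dropWhile (fun x => x != '\n') with
      | nil =>
        rw [if_pos (by simp)]
        have hnl : '\n' ∉ rem := by
          rw [hsplit, hrest]; simpa using hline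
        rw [repN_no_newline ind rem hnl]
        simp only [List.flatten_cons, List.flatten_nil, List.append_nil]
        exact congrArg ('\n' :: ·) hrem
      | cons d rest' =>
        rw [if_neg (by simp)]
        have hd : d = '\n' := by
          have h2 := List.head_dropWhile_not (l := rem) (fun x => x != '\n') (by simp [hrest])
          simpa [hrest] using h2
        subst hd
        set L := rem.takeWhile (fun x => x != '\n') with hL
        have hdecomp : rem = L ++ '\n' :: rest' := by
          conv_lhs => rw [hsplit]
          rw [hrest]
        have hlen' : rest'.length ≤ n := by
          have := congrArg List.length hdecomp
          simp at this ht
          omega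
        conv_lhs => rw [hdecomp]
        rw [repN_copy ind _ _ hline]
        rw [ih rest' hlen']
        simp
-- strip drops the sentinel newline both sides carry in front
lemma strip_cons_newline (x : List Char) : PySem.Chars.strip ('\n' :: x) = PySem.Chars.strip x := by
  have h : PySem.Chars.isspace '\n' = true := rfl
  simp [PySem.Chars.strip, PySem.Chars.lstrip, List.dropWhile, h]

-- ===== VERDICT (by name: the statement is the Claim_ definition above) =====
theorem fixIndents_spec : Claim_equal_fixIndents := by
  intro text _ _
  unfold Spec_fixIndents fixIndents fixIndents_alt
  simp only []
  set t1 := if PySem.List.pyGet? text.toList 0 = some '\n' then PySem.Chars.slice text.toList (some 1) none else text.toList with ht1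
  set ind := t1.takeWhile (fun c => c == ' ' || c == '\t') with hindd
  congr 1
  rw [wsLoop_acc t1 ['\n'], wsLoop_eq_takeWhile t1]
  rw [show (['\n'] ++ t1.takeWhile (fun c => c == ' ' || c == '\t') : List Char) = '\n' :: ind from rfl]
  rw [replace_eq_repN ind ('\n' :: t1)]
  rw [repN_eq_dedentGo ind t1.length t1 (le_refl _)]
  rw [strip_cons_newline]
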